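-- pv_equiv track=rewrite | github.com/patrickleungwl/code_lab | aoc/2019/09/sol1.py | combine_codes
-- ===== SOURCE A (Python) =====
-- def combine_codes(codes):
--     # find max cell with value
--     max = len(codes)-1
--     while max > 0:
--         if codes[max] > 0:
--             break
--         max = max-1
--     realcodes = []
--     for i in range(0,max+1):
--         realcodes.append(str(codes[i]))
--     return ','.join(realcodes)
-- ===== SOURCE B (Python) =====
-- def combine_codes(codes):
--     # Build the output back-to-front in one pass: walking the tail from the
--     # right, a value is kept once anything to its right is kept or it is
--     # positive; the first element is always kept.
--     if not codes:
--         return ''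
--     out = []
--     for c in reversed(codes[1:]):
--         if out or c > 0:
--             out.append(str(c))
--     out.append(str(codes[0]))
--     out.reverse()
--     return ','.join(out)
-- ===== Notes on version B (the rewrite author's own statement) =====
-- stated objective: alternative
-- what changed: Instead of A's two phases (search for the cutoff index, then an index-range append loop over the prefix), B builds the output list back-to-front in a single right-to-left pass with no index arithmetic: walking the reversed tail it keeps a value once anything to its right was kept or the value is positive, then appends the always-kept head and reverses.
import Mathlib
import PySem

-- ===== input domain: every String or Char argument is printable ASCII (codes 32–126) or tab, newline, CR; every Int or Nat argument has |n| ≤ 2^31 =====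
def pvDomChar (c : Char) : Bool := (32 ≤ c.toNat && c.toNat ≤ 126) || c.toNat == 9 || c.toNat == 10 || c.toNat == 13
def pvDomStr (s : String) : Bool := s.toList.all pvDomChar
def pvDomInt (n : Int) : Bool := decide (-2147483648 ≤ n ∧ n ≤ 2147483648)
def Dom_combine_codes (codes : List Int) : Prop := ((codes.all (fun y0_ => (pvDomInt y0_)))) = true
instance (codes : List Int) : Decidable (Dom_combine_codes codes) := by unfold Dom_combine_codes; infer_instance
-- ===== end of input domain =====

-- B replaces A's two phases (backward cutoff-index search, then an index-range append loop)
-- by a single right-to-left pass that builds the output list back-to-front with no index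
-- arithmetic (an alternative decomposition, not faster).

-- ===== PORT A =====
-- A's while-loop 'while max > 0: if codes[max] > 0: break; max = max-1', fuel = codes.length
-- (always sufficient since max starts at codes.length - 1); the indices accessed are always
-- in range, so pyGetD's default is never used and the port is exact.
def combineFindMax (codes : List Int) : Nat → Int → Int
  | 0, m => m
  | f + 1, m =>
    if m > 0 then
      if PySem.List.pyGetD codes m 0 > 0 then m else combineFindMax codes f (m - 1)
    else m

def combine_codes (codes : List Int) : String :=
  let mx := combineFindMax codes codes.length ((codes.length : Int) - 1)
  let realcodes := (PySem.List.pyRange 0 (mx + 1)).foldl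
      (fun acc i => acc ++ [PySem.Int.toStr (PySem.List.pyGetD codes i 0)]) []
  PySem.Str.join "," realcodes

-- ===== PORT B =====
-- 'if not codes: return ""' then one loop over reversed(codes[1:]) appending kept values,
-- append str(codes[0]), reverse, join.
def combine_codes_alt (codes : List Int) : String :=
  match codes with
  | [] => ""
  | x :: xs =>
    let out := xs.reverse.foldl
        (fun out c => if out ≠ [] ∨ c > 0 then out ++ [PySem.Int.toStr c] else out) []
    let out := out ++ [PySem.Int.toStr x]
    PySem.Str.join "," out.reverse

-- ===== PRECONDITION & SPEC =====
def Spec_combine_codes (codes : List Int) (out : String) : Prop := out = combine_codes_alt codes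
instance (codes : List Int) (out : String) : Decidable (Spec_combine_codes codes out) := by unfold Spec_combine_codes; infer_instance

-- ===== CLAIM (what is proved, stated in full; the proofs are below) =====
def Claim_equal_combine_codes : Prop := ∀ (codes : List Int), Dom_combine_codes codes → Spec_combine_codes codes (combine_codes codes)

-- ===== LEMMAS AND PROOFS =====

-- the value A's backward search computes: last index in [1..m] whose code is > 0, else 0
def pvJ (codes : List Int) : Nat → Nat
  | 0 => 0
  | m + 1 => if codes.getD (m + 1) 0 > 0 then m + 1 else pvJ codes m

-- the trimmed tail B effectively keeps: drop trailing non-positives, [] if all non-positive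
def pvTrim : List Int → List Int
  | [] => []
  | x :: xs => let rest := pvTrim xs
               if rest ≠ [] ∨ x > 0 then x :: rest else []

theorem pvJ_le (codes : List Int) (m : Nat) : pvJ codes m ≤ m := by
  induction m with
  | zero => simp [pvJ]
  | succ m ih =>
    simp only [pvJ]
    split_ifs with h
    · exact le_refl _
    · omega

theorem combineFindMax_eq (codes : List Int) (m f : Nat) (hf : m ≤ f) :
    combineFindMax codes f (m : Int) = (pvJ codes m : Int) := by
  induction m generalizing f with
  | zero =>
    cases f with
    | zero => simp [combineFindMax, pvJ]
    | succ f => simp [combineFindMax, pvJ]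
  | succ m ih =>
    cases f with
    | zero => omega
    | succ f =>
      have hpos : ((m + 1 : Nat) : Int) > 0 := by exact_mod_cast Nat.succ_pos m
      have hm1 : ((m + 1 : Nat) : Int) - 1 = (m : Int) := by push_cast; ring
      rw [show combineFindMax codes (f + 1) ((m + 1 : Nat) : Int)
          = if PySem.List.pyGetD codes ((m + 1 : Nat) : Int) 0 > 0 then ((m + 1 : Nat) : Int)
            else combineFindMax codes f (((m + 1 : Nat) : Int) - 1) by
            simp only [combineFindMax, if_pos hpos]]
      rw [PySem.List.pyGetD_natCast, hm1, ih f (by omega)]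
      by_cases h : codes.getD (m + 1) 0 > 0
      · rw [if_pos h]; simp only [pvJ, if_pos h]
      · rw [if_neg h]; simp only [pvJ, if_neg h]

theorem pvJ_append (codes : List Int) (x : Int) (m : Nat) (hm : m < codes.length) :
    pvJ (codes ++ [x]) m = pvJ codes m := by
  induction m with
  | zero => simp [pvJ]
  | succ m ih =>
    have hg : (codes ++ [x]).getD (m + 1) 0 = codes.getD (m + 1) 0 := by
      unfold List.getD
      rw [List.getElem?_append_left hm]
    simp only [pvJ, hg]
    split_ifs with h
    · rfl
    · exact ih (by omega)

theorem pvTrim_append (xs : List Int) (z : Int) :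
    pvTrim (xs ++ [z]) = if z > 0 then xs ++ [z] else pvTrim xs := by
  induction xs with
  | nil => by_cases h : z > 0 <;> simp [pvTrim, h]
  | cons y ys ih =>
    show pvTrim (y :: (ys ++ [z])) = _
    simp only [pvTrim, ih]
    by_cases h : z > 0
    · simp [h]
    · simp only [h, if_false]

-- A's kept prefix equals head :: B's trimmed tail
theorem take_eq_trim (x : Int) (xs : List Int) :
    (x :: xs).take (pvJ (x :: xs) xs.length + 1) = x :: pvTrim xs := by
  induction xs using List.reverseRecOn with
  | nil => simp [pvJ, pvTrim]
  | append_singleton ys z ih =>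
    have hlen : (ys ++ [z]).length = ys.length + 1 := by simp
    have hgd : (x :: (ys ++ [z])).getD (ys.length + 1) 0 = z := by
      unfold List.getD
      rw [show x :: (ys ++ [z]) = (x :: ys) ++ [z] from rfl,
          List.getElem?_append_right (by simp)]
      simp
    rw [hlen]
    simp only [pvJ, hgd, pvTrim_append]
    by_cases h : z > 0
    · rw [if_pos h, if_pos h]
      have : (x :: (ys ++ [z])).length = ys.length + 1 + 1 := by simp
      rw [List.take_of_length_le (by omega)]
    · rw [if_neg h, if_neg h]
      have hJ : pvJ (x :: (ys ++ [z])) ys.length = pvJ (x :: ys) ys.length := by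
        rw [show x :: (ys ++ [z]) = (x :: ys) ++ [z] from rfl]
        exact pvJ_append (x :: ys) z ys.length (by simp)
      have hle : pvJ (x :: ys) ys.length + 1 ≤ (x :: ys).length := by
        have := pvJ_le (x :: ys) ys.length
        simp; omega
      rw [hJ, show x :: (ys ++ [z]) = (x :: ys) ++ [z] from rfl,
          List.take_append_of_le_length hle, ih]

-- B's fold over the reversed tail builds the reversed trimmed tail (as strings)
theorem fold_eq_trim (xs : List Int) :
    xs.reverse.foldl
        (fun out c => if out ≠ [] ∨ c > 0 then out ++ [PySem.Int.toStr c] else out) []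
      = ((pvTrim xs).map PySem.Int.toStr).reverse := by
  induction xs with
  | nil => simp [pvTrim]
  | cons y ys ih =>
    rw [List.reverse_cons, List.foldl_append, ih]
    simp only [List.foldl]
    have hne : (((pvTrim ys).map PySem.Int.toStr).reverse ≠ []) ↔ (pvTrim ys ≠ []) := by
      simp
    by_cases h : pvTrim ys ≠ [] ∨ y > 0
    · rw [if_pos (by rw [hne]; exact h)]
      show _ = ((pvTrim (y :: ys)).map PySem.Int.toStr).reverse
      simp only [pvTrim, if_pos h]
      simp
    · rw [if_neg (by rw [hne]; exact h)]
      show _ = ((pvTrim (y :: ys)).map PySem.Int.toStr).reverse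
      simp only [pvTrim, if_neg h]
      push Not at h
      simp [h.1]

theorem map_getD_range (codes : List Int) (j : Nat) (hj : j ≤ codes.length) :
    (List.range j).map (fun k => codes.getD k 0) = codes.take j := by
  apply List.ext_getElem
  · simp [hj]
  · intro i h1 h2
    simp only [List.getElem_map, List.getElem_range, List.getElem_take]
    have hi : i < j := by simpa using h1
    have hic : i < codes.length := by omega
    simp [List.getD, List.getElem?_eq_getElem hic]

theorem take_map_eq (codes : List Int) (J : Nat) (hJ : J + 1 ≤ codes.length) :
    (PySem.List.pyRange 0 ((J : Int) + 1)).foldl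
      (fun acc i => acc ++ [PySem.Int.toStr (PySem.List.pyGetD codes i 0)]) []
    = ((codes.take (J + 1)).map PySem.Int.toStr) := by
  rw [PySem.List.foldl_append_singleton_eq_map, List.nil_append]
  have hc : ((J : Int) + 1) = ((J + 1 : Nat) : Int) := by push_cast; ring
  rw [hc, PySem.List.pyRange_zero_natCast, List.map_map]
  have : ((fun i => PySem.Int.toStr (PySem.List.pyGetD codes i 0)) ∘ fun k : Nat => (k : Int))
      = fun k : Nat => PySem.Int.toStr (codes.getD k 0) := by
    funext k
    simp [Function.comp, PySem.List.pyGetD_natCast]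
  rw [this, ← map_getD_range codes (J + 1) hJ, List.map_map]
  rfl

-- ===== VERDICT (by name: the statement is the Claim_ definition above) =====
theorem combine_codes_spec : Claim_equal_combine_codes := by
  intro codes _
  unfold Spec_combine_codes
  match codes with
  | [] => decide
  | x :: xs =>
    set J : Nat := pvJ (x :: xs) xs.length with hJdef
    have hJle : J ≤ xs.length := pvJ_le _ _
    have hA : combine_codes (x :: xs)
        = PySem.Str.join "," (((x :: xs).take (J + 1)).map PySem.Int.toStr) := by
      unfold combine_codes
      have hcast : (((x :: xs).length : Int) - 1) = ((xs.length : Nat) : Int) := by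
        simp
      rw [hcast, combineFindMax_eq (x :: xs) xs.length (x :: xs).length (by simp), ← hJdef]
      show PySem.Str.join "," ((PySem.List.pyRange 0 ((J : Int) + 1)).foldl
          (fun acc i => acc ++ [PySem.Int.toStr (PySem.List.pyGetD (x :: xs) i 0)]) []) = _
      rw [take_map_eq (x :: xs) J (by simp; omega)]
    have hB : combine_codes_alt (x :: xs)
        = PySem.Str.join "," (((x :: xs).take (J + 1)).map PySem.Int.toStr) := by
      show PySem.Str.join ","
          ((xs.reverse.foldl
              (fun out c => if out ≠ [] ∨ c > 0 then out ++ [PySem.Int.toStr c] else out) []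
            ++ [PySem.Int.toStr x]).reverse) = _
      rw [fold_eq_trim, hJdef, take_eq_trim]
      simp
    rw [hA, hB]
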